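-- pv_equiv track=rewrite | github.com/DTU-Nanolab-materials-discovery/nomad-dtu-nanolab-plugin | src/nomad_dtu_nanolab_plugin/autosampler_reader.py | get_uma_sequence_length
-- ===== SOURCE A (Python) =====
-- def get_uma_sequence_length(sample_names):
--     sample_name_counts = {}
--     for i, name in enumerate(sample_names):
--         if name in sample_name_counts:
--             sample_name_counts[name].append(i)
--         else:
--             sample_name_counts[name] = [i]
--     # Determine the interval between occurrences of the same sample name
--     intervals = []
--     for indices in sample_name_counts.values():
--         if len(indices) > 1:
--             intervals.append(indices[1] - indices[0])
--
--     # check the last interval (the reminder of the list)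
--     if len(intervals) > 1:
--         intervals.append(len(sample_names) - sample_name_counts[sample_names[0]][-1])
--
--     # check that all intervals are the same
--     if not all(interval == intervals[0] for interval in intervals):
--         raise ValueError('Intervals between collects are not consistent.')
--
--     return intervals[0]
-- ===== SOURCE B (Python) =====
-- def get_uma_sequence_length(sample_names):
--     first = sample_names[0]
--     first_seen = {}
--     recorded = set()
--     intervals = []
--     first_last_index = 0
--     for i, name in enumerate(sample_names):
--         if name == first:
--             first_last_index = i
--         if name in first_seen:
--             if name not in recorded:
--                 intervals.append(i - first_seen[name])
--                 recorded.add(name)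
--         else:
--             first_seen[name] = i
--     if len(intervals) > 1:
--         intervals.append(len(sample_names) - first_last_index)
--     if any(iv != intervals[0] for iv in intervals):
--         raise ValueError('Intervals between collects are not consistent.')
--     return intervals[0]
-- ===== Notes on version B (the rewrite author's own statement) =====
-- stated objective: alternative
-- what changed: B replaces A's dict of full occurrence-index lists plus a second pass over its values by a single pass that keeps only each name's first-seen index, a recorded set, and the last index of sample_names[0], appending each interval at a name's second occurrence.
import Mathlib
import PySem

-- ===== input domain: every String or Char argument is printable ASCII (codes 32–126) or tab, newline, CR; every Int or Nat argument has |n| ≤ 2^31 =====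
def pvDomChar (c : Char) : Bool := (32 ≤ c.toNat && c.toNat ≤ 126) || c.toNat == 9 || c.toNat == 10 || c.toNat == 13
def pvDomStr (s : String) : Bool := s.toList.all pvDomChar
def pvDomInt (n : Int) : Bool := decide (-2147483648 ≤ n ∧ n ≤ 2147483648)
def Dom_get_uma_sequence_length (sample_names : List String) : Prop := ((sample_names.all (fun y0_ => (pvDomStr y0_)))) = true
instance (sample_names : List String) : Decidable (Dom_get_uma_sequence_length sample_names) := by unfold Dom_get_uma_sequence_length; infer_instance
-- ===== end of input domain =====

-- B replaces A's dict-of-all-occurrence-indices plus second pass over its values by a single pass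
-- that records each name's interval once, at its second occurrence (objective: alternative).

-- ===== PORT A =====
-- loop body of A's first loop: append i to the name's index list (or start it)
def astep (d : PySem.Dict String (List Int)) (p : Int × String) : PySem.Dict String (List Int) :=
  if d.contains p.2 then d.modify p.2 [] (fun l => l ++ [p.1]) else d.insert p.2 [p.1]

def get_uma_sequence_length (sample_names : List String) : Int :=
  let counts := (PySem.List.enumerate sample_names 0).foldl astep PySem.Dict.empty
  let intervals : List Int :=
    counts.values.foldl
      (fun acc indices =>
        if 1 < indices.length then
          -- indices[1] - indices[0]: both in range since len(indices) > 1
          acc ++ [PySem.List.pyGetD indices 1 0 - PySem.List.pyGetD indices 0 0]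
        else acc) []
  let intervals :=
    if 1 < intervals.length then
      -- sample_names[0] and [-1] are in range here: intervals nonempty forces sample_names nonempty
      intervals ++ [(sample_names.length : Int)
        - PySem.List.pyGetD (counts.getD (PySem.List.pyGetD sample_names 0 "") []) (-1) 0]
    else intervals
  if !(intervals.all (fun iv => iv == PySem.List.pyGetD intervals 0 0)) then
    0  -- raise ValueError: excluded by Pre_
  else
    PySem.List.pyGetD intervals 0 0  -- IndexError when intervals = []: excluded by Pre_

-- ===== PORT B =====
-- loop body of B's single pass; state = (first_seen, recorded, intervals, first_last_index)
def bstep (first : String)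
    (s : PySem.Dict String Int × PySem.Set String × List Int × Int)
    (p : Int × String) : PySem.Dict String Int × PySem.Set String × List Int × Int :=
  let fli := if p.2 == first then p.1 else s.2.2.2
  if s.1.contains p.2 then
    if !(PySem.Set.contains s.2.1 p.2) then
      (s.1, PySem.Set.add s.2.1 p.2, s.2.2.1 ++ [p.1 - s.1.getD p.2 0], fli)
    else (s.1, s.2.1, s.2.2.1, fli)
  else (s.1.insert p.2 p.1, s.2.1, s.2.2.1, fli)

def get_uma_sequence_length_alt (sample_names : List String) : Int :=
  let first := PySem.List.pyGetD sample_names 0 ""  -- sample_names[0]: in range under Pre_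
  let st := (PySem.List.enumerate sample_names 0).foldl (bstep first)
      (PySem.Dict.empty, PySem.Set.empty, ([] : List Int), (0 : Int))
  let intervals := st.2.2.1
  let intervals :=
    if 1 < intervals.length then intervals ++ [(sample_names.length : Int) - st.2.2.2]
    else intervals
  if intervals.any (fun iv => iv != PySem.List.pyGetD intervals 0 0) then
    0  -- raise ValueError: excluded by Pre_
  else
    PySem.List.pyGetD intervals 0 0  -- IndexError when intervals = []: excluded by Pre_

-- ===== PRECONDITION & SPEC =====
-- the list of occurrence positions of x in names
def pvPos (names : List String) (x : String) : List Int :=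
  ((PySem.List.enumerate names 0).filter (fun p => p.2 == x)).map (·.1)

-- distance between the first two occurrences of a repeated name
def pvGap (names : List String) (x : String) : Int :=
  PySem.List.pyGetD (pvPos names x) 1 0 - PySem.List.pyGetD (pvPos names x) 0 0

-- index of the last occurrence of names[0]
def pvLastFirst (names : List String) : Int :=
  (pvPos names (PySem.List.pyGetD names 0 "")).getLastD 0

-- Pre_ = exactly where A returns: some name repeats, all first-two-occurrence gaps agree, and if
-- at least two distinct names repeat, the tail remainder after the last occurrence of names[0]
-- equals that common gap (otherwise A raises IndexError or ValueError).
def Pre_get_uma_sequence_length (sample_names : List String) : Prop :=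
  (∃ x ∈ sample_names, 1 < (pvPos sample_names x).length) ∧
  (∀ x ∈ sample_names, 1 < (pvPos sample_names x).length →
    ∀ y ∈ sample_names, 1 < (pvPos sample_names y).length →
      pvGap sample_names x = pvGap sample_names y) ∧
  ((∃ x ∈ sample_names, ∃ y ∈ sample_names, x ≠ y ∧
      1 < (pvPos sample_names x).length ∧ 1 < (pvPos sample_names y).length) →
    ∀ x ∈ sample_names, 1 < (pvPos sample_names x).length →
      (sample_names.length : Int) - pvLastFirst sample_names = pvGap sample_names x)

instance (sample_names : List String) : Decidable (Pre_get_uma_sequence_length sample_names) := by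
  unfold Pre_get_uma_sequence_length; infer_instance

def pvWitness_get_uma_sequence_length : List String := ["a", "b", "a", "b"]

def Spec_get_uma_sequence_length (sample_names : List String) (out : Int) : Prop := out = get_uma_sequence_length_alt sample_names
instance (sample_names : List String) (out : Int) : Decidable (Spec_get_uma_sequence_length sample_names out) := by unfold Spec_get_uma_sequence_length; infer_instance

-- ===== CLAIM (what is proved, stated in full; the proofs are below) =====
def Claim_equal_get_uma_sequence_length : Prop := ∀ (sample_names : List String), Dom_get_uma_sequence_length sample_names → Pre_get_uma_sequence_length sample_names → Spec_get_uma_sequence_length sample_names (get_uma_sequence_length sample_names)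

-- ===== LEMMAS AND PROOFS =====

def posL (l : List (Int × String)) (x : String) : List Int :=
  (l.filter (fun p => p.2 == x)).map (·.1)

lemma astep_eq_modify : astep = fun d p => d.modify p.2 [] (fun l => l ++ [p.1]) := by
  funext d p
  unfold astep
  by_cases h : d.contains p.2
  · simp [h]
  · simp only [Bool.not_eq_true] at h
    simp [h, PySem.Dict.modify, PySem.Dict.getD_of_not_contains _ _ h]

lemma dictA_getD (names : List String) (x : String) :
    ((PySem.List.enumerate names 0).foldl astep PySem.Dict.empty).getD x [] = pvPos names x := by
  rw [astep_eq_modify]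
  have hswap : (PySem.List.enumerate names 0).foldl (fun d (p : Int × String) => d.modify p.2 [] (fun l => l ++ [p.1])) PySem.Dict.empty
      = ((PySem.List.enumerate names 0).map Prod.swap).foldl (fun d (p : String × Int) => d.modify p.1 [] (fun l => l ++ [p.2])) PySem.Dict.empty := by
    rw [List.foldl_map]; rfl
  rw [hswap, PySem.Dict.getD_foldl_modify_append]
  simp [pvPos, List.filter_map, List.map_map, Function.comp_def, PySem.Dict.getD_empty]

lemma dictA_keys (names : List String) :
    ((PySem.List.enumerate names 0).foldl astep PySem.Dict.empty).keys = PySem.Set.ofList names := by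
  rw [astep_eq_modify]
  rw [PySem.Dict.keys_foldl_modify_key (key := fun p : Int × String => p.2) (d0 := ([] : List Int)) (f := fun _ p => fun l => l ++ [p.1])]
  simp [PySem.Dict.keys_empty, PySem.Set.update_nil_left, PySem.List.map_snd_enumerate]

lemma dictA_keys_nodup (names : List String) :
    ((PySem.List.enumerate names 0).foldl astep PySem.Dict.empty).keys.Nodup := by
  rw [astep_eq_modify]
  exact PySem.Dict.nodup_keys_foldl_modify_key _ _ _ _ _ (by simp [PySem.Dict.keys_empty])

def reps (names : List String) : List String :=
  (PySem.Set.ofList names).filter (fun x => decide (1 < (pvPos names x).length))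

lemma ivsA_eq (names : List String) :
    ((PySem.List.enumerate names 0).foldl astep PySem.Dict.empty).values.foldl
      (fun acc indices =>
        if 1 < indices.length then
          acc ++ [PySem.List.pyGetD indices 1 0 - PySem.List.pyGetD indices 0 0]
        else acc) []
    = (reps names).map (pvGap names) := by
  rw [PySem.Dict.values_eq_map_keys _ (dictA_keys_nodup names) []]
  have h := PySem.List.foldl_append_if
    (p := fun v : List Int => decide (1 < v.length))
    (f := fun v : List Int => PySem.List.pyGetD v 1 0 - PySem.List.pyGetD v 0 0)
    (((PySem.List.enumerate names 0).foldl astep PySem.Dict.empty).keys.map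
      (fun k => ((PySem.List.enumerate names 0).foldl astep PySem.Dict.empty).getD k []))
    []
  simp only [decide_eq_true_eq] at h
  rw [h]
  simp only [List.filter_map, List.map_map, Function.comp_def, dictA_getD, dictA_keys, List.nil_append]
  rfl

lemma posL_append_singleton (l : List (Int × String)) (p : Int × String) (x : String) :
    posL (l ++ [p]) x = posL l x ++ (if p.2 == x then [p.1] else []) := by
  simp only [posL, List.filter_append, List.map_append]
  by_cases h : p.2 == x <;> simp [h]

lemma posL_ne_nil_iff (l : List (Int × String)) (x : String) :
    posL l x ≠ [] ↔ x ∈ l.map (·.2) := by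
  simp [posL, List.filter_eq_nil_iff, List.mem_map]

lemma filter_len_succ {α : Type} (s : List α) (hnd : s.Nodup) (a : α) (ha : a ∈ s)
    (q q' : α → Bool) (hq'a : q' a = true) (hqa : q a = false)
    (hagree : ∀ x ∈ s, x ≠ a → q' x = q x) :
    (s.filter q').length = (s.filter q).length + 1 := by
  induction s with
  | nil => cases ha
  | cons b s ih =>
    rcases List.mem_cons.mp ha with hab | hbs
    · subst hab
      have hbs' : a ∉ s := (List.nodup_cons.mp hnd).1
      have : s.filter q' = s.filter q := by
        apply List.filter_congr
        intro x hx
        exact hagree x (List.mem_cons_of_mem _ hx) (fun h => hbs' (h ▸ hx))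
      simp [hq'a, hqa, this]
    · have hba : b ≠ a := by rintro rfl; exact (List.nodup_cons.mp hnd).1 hbs
      have hq'b : q' b = q b := hagree b (by simp) hba
      have := ih (List.nodup_cons.mp hnd).2 hbs
        (fun x hx hxa => hagree x (List.mem_cons_of_mem _ hx) hxa)
      by_cases hb : q b = true <;> simp [hq'b, hb, this]

lemma pyGetD_two_of_append (a : List Int) (t : List Int) (h : 1 < a.length) :
    PySem.List.pyGetD (a ++ t) 1 0 = PySem.List.pyGetD a 1 0 ∧
    PySem.List.pyGetD (a ++ t) 0 0 = PySem.List.pyGetD a 0 0 := by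
  match a, h with
  | i0 :: i1 :: r, _ =>
    constructor <;> simp [PySem.List.pyGetD_ofNat']

lemma binv (first : String) (l : List (Int × String)) :
    (∀ x, (l.foldl (bstep first) (PySem.Dict.empty, PySem.Set.empty, ([] : List Int), (0 : Int))).1.get? x = (posL l x).head?) ∧
    (∀ x, (x ∈ (l.foldl (bstep first) (PySem.Dict.empty, PySem.Set.empty, ([] : List Int), (0 : Int))).2.1) ↔ 1 < (posL l x).length) ∧
    ((l.foldl (bstep first) (PySem.Dict.empty, PySem.Set.empty, ([] : List Int), (0 : Int))).2.2.1.length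
      = ((PySem.Set.ofList (l.map (·.2))).filter (fun x => decide (1 < (posL l x).length))).length) ∧
    (∀ v ∈ (l.foldl (bstep first) (PySem.Dict.empty, PySem.Set.empty, ([] : List Int), (0 : Int))).2.2.1,
      ∃ x, 1 < (posL l x).length ∧
        v = PySem.List.pyGetD (posL l x) 1 0 - PySem.List.pyGetD (posL l x) 0 0) ∧
    (l.foldl (bstep first) (PySem.Dict.empty, PySem.Set.empty, ([] : List Int), (0 : Int))).2.2.2
      = (posL l first).getLastD 0 := by
  induction l using List.reverseRecOn with
  | nil =>
    refine ⟨?_, ?_, ?_, ?_, ?_⟩ <;> simp [posL, PySem.Dict.get?_empty, PySem.Set.empty]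
  | append_singleton l p ih =>
    obtain ⟨ih1, ih2, ih3, ih4, ih5⟩ := ih
    rw [List.foldl_append, List.foldl_cons, List.foldl_nil] at *
    revert ih1 ih2 ih3 ih4 ih5
    generalize (l.foldl (bstep first) (PySem.Dict.empty, PySem.Set.empty, ([] : List Int), (0 : Int))) = st
    obtain ⟨D, R, I, F⟩ := st
    intro ih1 ih2 ih3 ih4 ih5
    simp only at ih1 ih2 ih3 ih4 ih5
    have hSetmap : (PySem.Set.ofList ((l ++ [p]).map (·.2))) = PySem.Set.add (PySem.Set.ofList (l.map (·.2))) p.2 := by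
      rw [List.map_append, ← PySem.Set.ofList_append_singleton]
      rfl
    have hfli : (if (p.2 == first) then p.1 else F) = (posL (l ++ [p]) first).getLastD 0 := by
      rw [posL_append_singleton]
      by_cases hf : (p.2 == first) = true
      · simp [hf]
      · simp only [Bool.not_eq_true] at hf
        simp [hf, ih5]
    by_cases hnil : posL l p.2 = []
    · -- first occurrence of p.2
      have hcont : D.contains p.2 = false := by
        rw [PySem.Dict.contains_eq_isSome_get?, ih1, hnil]; rfl
      have hnotmem : p.2 ∉ l.map (·.2) := by
        rw [← posL_ne_nil_iff]; simp [hnil]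
      simp only [bstep, hcont]
      simp only [Bool.false_eq_true, if_false]
      refine ⟨?_, ?_, ?_, ?_, hfli⟩
      · intro x
        rw [posL_append_singleton]
        by_cases hx : x = p.2
        · subst hx
          simp [PySem.Dict.get?_insert_self, hnil]
        · simp [PySem.Dict.get?_insert_of_ne _ _ hx, ih1, beq_false_of_ne (Ne.symm hx)]
      · intro x
        rw [posL_append_singleton]
        by_cases hx : x = p.2
        · subst hx
          simp [ih2, hnil]
        · simp [ih2, beq_false_of_ne (Ne.symm hx)]
      · rw [ih3, hSetmap, PySem.Set.add_of_not_mem (by simpa [PySem.Set.mem_ofList] using hnotmem)]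
        rw [List.filter_append]
        have h1 : (List.filter (fun x => decide (1 < (posL (l ++ [p]) x).length)) [p.2]) = [] := by
          simp [posL_append_singleton, hnil]
        have h2 : List.filter (fun x => decide (1 < (posL (l ++ [p]) x).length)) (PySem.Set.ofList (l.map (·.2)))
            = List.filter (fun x => decide (1 < (posL l x).length)) (PySem.Set.ofList (l.map (·.2))) := by
          apply List.filter_congr
          intro x hx
          have hxne : ¬ x = p.2 := by
            intro h; subst h; exact hnotmem (by simpa [PySem.Set.mem_ofList] using hx)
          rw [posL_append_singleton, beq_false_of_ne (Ne.symm hxne)]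
          simp
        rw [h1, h2]
        simp
      · intro v hv
        obtain ⟨x, hxlen, hxv⟩ := ih4 v hv
        have hxne : ¬ x = p.2 := by
          intro h; subst h
          rw [hnil] at hxlen; simp at hxlen
        refine ⟨x, ?_, ?_⟩ <;> rw [posL_append_singleton, beq_false_of_ne (Ne.symm hxne)] <;>
          simp [hxlen, hxv]
    · have hcont : D.contains p.2 = true := by
        rw [PySem.Dict.contains_eq_isSome_get?, ih1]
        obtain ⟨a, t, ht⟩ := List.exists_cons_of_ne_nil hnil
        simp [ht]
      have hmem : p.2 ∈ PySem.Set.ofList (l.map (·.2)) := by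
        rw [PySem.Set.mem_ofList, ← posL_ne_nil_iff]; exact hnil
      by_cases hlong : 1 < (posL l p.2).length
      · -- already recorded
        have hrec : PySem.Set.contains R p.2 = true := by
          rw [PySem.Set.contains_iff]; exact (ih2 p.2).mpr hlong
        simp only [bstep, hcont, hrec]
        simp only [Bool.not_true, Bool.false_eq_true, if_false, if_true]
        refine ⟨?_, ?_, ?_, ?_, hfli⟩
        · intro x
          rw [posL_append_singleton, ih1]
          by_cases hx : x = p.2
          · subst hx
            rw [List.head?_append]
            obtain ⟨a, t, ht⟩ := List.exists_cons_of_ne_nil hnil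
            simp [ht]
          · simp [beq_false_of_ne (Ne.symm hx)]
        · intro x
          rw [posL_append_singleton, ih2]
          by_cases hx : x = p.2
          · subst hx
            simp only [beq_self_eq_true, if_true, List.length_append, List.length_cons,
              List.length_nil]
            constructor
            · intro _; omega
            · intro _; exact hlong
          · simp [beq_false_of_ne (Ne.symm hx)]
        · rw [ih3, hSetmap, PySem.Set.add_of_mem hmem]
          congr 1
          apply List.filter_congr
          intro x hx
          rw [posL_append_singleton]
          by_cases hx2 : x = p.2
          · subst hx2
            simp [hlong]
            omega
          · simp [beq_false_of_ne (Ne.symm hx2)]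
        · intro v hv
          obtain ⟨x, hxlen, hxv⟩ := ih4 v hv
          by_cases hx : x = p.2
          · subst hx
            obtain ⟨e1, e2⟩ := pyGetD_two_of_append (posL l p.2) [p.1] hxlen
            refine ⟨p.2, ?_, ?_⟩ <;> rw [posL_append_singleton, if_pos (beq_self_eq_true p.2)]
            · simp only [List.length_append, List.length_cons, List.length_nil]; omega
            · rw [e1, e2]; exact hxv
          · refine ⟨x, ?_, ?_⟩ <;> rw [posL_append_singleton, beq_false_of_ne (Ne.symm hx)] <;>
              simp [hxlen, hxv]
      · -- second occurrence: record the interval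
        have hrec : PySem.Set.contains R p.2 = false := by
          rcases Bool.eq_false_or_eq_true (PySem.Set.contains R p.2) with h | h
          · exact absurd ((ih2 p.2).mp ((PySem.Set.contains_iff _ _).mp h)) hlong
          · exact h
        obtain ⟨i0, hP1⟩ : ∃ a, posL l p.2 = [a] := by
          have h1 : 0 < (posL l p.2).length := List.length_pos_iff.mpr hnil
          have h2 : (posL l p.2).length = 1 := by omega
          exact List.length_eq_one_iff.mp h2
        simp only [bstep, hcont, hrec]
        simp only [Bool.not_false, if_true]
        refine ⟨?_, ?_, ?_, ?_, hfli⟩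
        · intro x
          rw [posL_append_singleton, ih1]
          by_cases hx : x = p.2
          · subst hx
            simp [hP1]
          · simp [beq_false_of_ne (Ne.symm hx)]
        · intro x
          rw [posL_append_singleton, PySem.Set.mem_add, ih2]
          by_cases hx : x = p.2
          · subst hx
            simp [hP1]
          · simp [beq_false_of_ne (Ne.symm hx), hx]
        · rw [hSetmap, PySem.Set.add_of_mem hmem]
          simp only [List.length_append, List.length_cons, List.length_nil, ih3]
          rw [filter_len_succ (PySem.Set.ofList (l.map (·.2))) (PySem.Set.nodup_ofList _) p.2 hmem
              (fun x => decide (1 < (posL l x).length))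
              (fun x => decide (1 < (posL (l ++ [p]) x).length))
              (by simp [posL_append_singleton, hP1])
              (by simpa using hlong)
              ?_]
          intro x hx hxne
          show decide (1 < (posL (l ++ [p]) x).length) = decide (1 < (posL l x).length)
          rw [posL_append_singleton, beq_false_of_ne (Ne.symm hxne)]
          simp
        · intro v hv
          rw [List.mem_append] at hv
          rcases hv with hv | hv
          · obtain ⟨x, hxlen, hxv⟩ := ih4 v hv
            have hx : ¬ x = p.2 := by
              intro h; subst h
              rw [hP1] at hxlen; simp at hxlen
            refine ⟨x, ?_, ?_⟩ <;> rw [posL_append_singleton, beq_false_of_ne (Ne.symm hx)] <;>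
              simp [hxlen, hxv]
          · refine ⟨p.2, ?_, ?_⟩
            · rw [posL_append_singleton, if_pos (beq_self_eq_true p.2)]; simp [hP1]
            · rw [posL_append_singleton, if_pos (beq_self_eq_true p.2), hP1]
              have hv' : v = p.1 - D.getD p.2 0 := by simpa using hv
              rw [hv', PySem.Dict.getD_eq_get?_getD, ih1, hP1]
              simp [PySem.List.pyGetD_ofNat']

lemma pos_ne_nil_iff_mem (names : List String) (x : String) :
    pvPos names x ≠ [] ↔ x ∈ names := by
  have h1 : pvPos names x ≠ [] ↔ ∃ p ∈ PySem.List.enumerate names 0, p.2 = x := by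
    simp [pvPos, List.filter_eq_nil_iff]
  have h2 : x ∈ names ↔ ∃ p ∈ PySem.List.enumerate names 0, p.2 = x := by
    conv_lhs => rw [← PySem.List.map_snd_enumerate names 0]
    simp only [List.mem_map]
  rw [h1, h2]

lemma mem_reps_iff (names : List String) (x : String) :
    x ∈ reps names ↔ x ∈ names ∧ 1 < (pvPos names x).length := by
  simp [reps, List.mem_filter, PySem.Set.mem_ofList]

lemma reps_nodup (names : List String) : (reps names).Nodup := by
  exact (PySem.Set.nodup_ofList names).filter _

lemma finalA (ivs : List Int) (d : Int) (h : ivs ≠ []) (hall : ∀ v ∈ ivs, v = d) :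
    (if !(ivs.all (fun iv => iv == PySem.List.pyGetD ivs 0 0)) then 0
     else PySem.List.pyGetD ivs 0 0) = d := by
  obtain ⟨v, t, rfl⟩ := List.exists_cons_of_ne_nil h
  have hv : v = d := hall v (by simp)
  rw [PySem.List.pyGetD_zero_cons]
  have hcond : ((v :: t).all (fun iv => iv == v)) = true :=
    List.all_eq_true.mpr (by intro iv hiv; simp [hall iv hiv, hv])
  rw [hcond]
  simp [hv]

lemma finalB (ivs : List Int) (d : Int) (h : ivs ≠ []) (hall : ∀ v ∈ ivs, v = d) :
    (if ivs.any (fun iv => iv != PySem.List.pyGetD ivs 0 0) then 0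
     else PySem.List.pyGetD ivs 0 0) = d := by
  obtain ⟨v, t, rfl⟩ := List.exists_cons_of_ne_nil h
  have hv : v = d := hall v (by simp)
  rw [PySem.List.pyGetD_zero_cons]
  have hcond : ((v :: t).any (fun iv => iv != v)) = false := by
    simp only [List.any_eq_false]
    intro iv hiv
    simp [hall iv hiv, hv]
  rw [hcond]
  simp [hv]

lemma mem_of_rep (names : List String) (x : String) (h : 1 < (pvPos names x).length) :
    x ∈ names := by
  rw [← pos_ne_nil_iff_mem]
  intro hnil
  rw [hnil] at h
  simp at h

lemma pyGetD_neg_one_eq_getLastD (xs : List Int) (h : xs ≠ []) :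
    PySem.List.pyGetD xs (-1) 0 = xs.getLastD 0 := by
  induction xs using List.reverseRecOn with
  | nil => cases h rfl
  | append_singleton ys a _ =>
    rw [PySem.List.pyGetD_neg_one_append_singleton, List.getLastD_concat]

lemma two_reps (names : List String) (h : 1 < (reps names).length) :
    ∃ a ∈ names, ∃ b ∈ names, a ≠ b ∧
      1 < (pvPos names a).length ∧ 1 < (pvPos names b).length := by
  match hr : reps names, h with
  | a :: b :: t, _ =>
    have ha : a ∈ reps names := by rw [hr]; simp
    have hb : b ∈ reps names := by rw [hr]; simp
    have hnd := reps_nodup names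
    rw [hr] at hnd
    have hab : a ≠ b := by
      intro hab
      subst hab
      simp at hnd
    obtain ⟨han, hal⟩ := (mem_reps_iff names a).mp ha
    obtain ⟨hbn, hbl⟩ := (mem_reps_iff names b).mp hb
    exact ⟨a, han, b, hbn, hab, hal, hbl⟩

-- proof-side names for the ports' intermediate values (definitionally equal to the ports' lets)
def ivsAx (names : List String) : List Int :=
  ((PySem.List.enumerate names 0).foldl astep PySem.Dict.empty).values.foldl
    (fun acc indices =>
      if 1 < indices.length then
        acc ++ [PySem.List.pyGetD indices 1 0 - PySem.List.pyGetD indices 0 0]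
      else acc) []

def remx (names : List String) : Int :=
  (names.length : Int) - PySem.List.pyGetD
    (((PySem.List.enumerate names 0).foldl astep PySem.Dict.empty).getD
      (PySem.List.pyGetD names 0 "") []) (-1) 0

def postA (names : List String) : List Int :=
  if 1 < (ivsAx names).length then ivsAx names ++ [remx names] else ivsAx names

def stBx (names : List String) : PySem.Dict String Int × PySem.Set String × List Int × Int :=
  (PySem.List.enumerate names 0).foldl (bstep (PySem.List.pyGetD names 0 ""))
    (PySem.Dict.empty, PySem.Set.empty, ([] : List Int), (0 : Int))

def postB (names : List String) : List Int :=
  if 1 < (stBx names).2.2.1.length then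
    (stBx names).2.2.1 ++ [(names.length : Int) - (stBx names).2.2.2]
  else (stBx names).2.2.1

lemma A_eval (names : List String) :
    get_uma_sequence_length names =
      if !((postA names).all (fun iv => iv == PySem.List.pyGetD (postA names) 0 0)) then 0
      else PySem.List.pyGetD (postA names) 0 0 := rfl

lemma B_eval (names : List String) :
    get_uma_sequence_length_alt names =
      if (postB names).any (fun iv => iv != PySem.List.pyGetD (postB names) 0 0) then 0
      else PySem.List.pyGetD (postB names) 0 0 := rfl

-- ===== VERDICT (by name: the statement is the Claim_ definition above) =====
theorem get_uma_sequence_length_spec : Claim_equal_get_uma_sequence_length := by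
  intro names _hdom hpre
  unfold Spec_get_uma_sequence_length
  obtain ⟨⟨x0, hx0n, hx0l⟩, hall, hrem⟩ := hpre
  have hx0r : x0 ∈ reps names := (mem_reps_iff names x0).mpr ⟨hx0n, hx0l⟩
  have hnamesne : names ≠ [] := List.ne_nil_of_mem hx0n
  have hfirstmem : PySem.List.pyGetD names 0 "" ∈ names := by
    obtain ⟨h, t, rfl⟩ := List.exists_cons_of_ne_nil hnamesne
    rw [PySem.List.pyGetD_zero_cons]
    simp
  have hposfirst : pvPos names (PySem.List.pyGetD names 0 "") ≠ [] :=
    (pos_ne_nil_iff_mem names _).mpr hfirstmem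
  have hgap : ∀ x, x ∈ names → 1 < (pvPos names x).length → pvGap names x = pvGap names x0 :=
    fun x hxn hxl => hall x hxn hxl x0 hx0n hx0l
  have hremv : 1 < (reps names).length →
      (names.length : Int) - pvLastFirst names = pvGap names x0 := by
    intro h2
    obtain ⟨a, han, b, hbn, hab, hal, hbl⟩ := two_reps names h2
    exact hrem ⟨a, han, b, hbn, hab, hal, hbl⟩ x0 hx0n hx0l
  -- A-side intermediate values
  have hivsA : ivsAx names = (reps names).map (pvGap names) := ivsA_eq names
  have hrema : remx names = (names.length : Int) - pvLastFirst names := by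
    unfold remx
    rw [dictA_getD, pyGetD_neg_one_eq_getLastD _ hposfirst]
    rfl
  -- B-side loop invariant
  obtain ⟨_b1, _b2, b3, b4, b5⟩ :=
    binv (PySem.List.pyGetD names 0 "") (PySem.List.enumerate names 0)
  have b3' : (stBx names).2.2.1.length = (reps names).length := by
    rw [stBx, b3, PySem.List.map_snd_enumerate]
    rfl
  have b4' : ∀ v ∈ (stBx names).2.2.1, ∃ x, 1 < (pvPos names x).length ∧
      v = pvGap names x := b4
  have b5' : (stBx names).2.2.2 = pvLastFirst names := b5
  -- every member of either final list is the common gap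
  have hallA : ∀ v ∈ postA names, v = pvGap names x0 := by
    intro v hv
    unfold postA at hv
    have hmapmem : ∀ w ∈ ivsAx names, w = pvGap names x0 := by
      intro w hw
      rw [hivsA] at hw
      obtain ⟨x, hx, rfl⟩ := List.mem_map.mp hw
      obtain ⟨hxn, hxl⟩ := (mem_reps_iff names x).mp hx
      exact hgap x hxn hxl
    by_cases hlen : 1 < (ivsAx names).length
    · rw [if_pos hlen, List.mem_append] at hv
      rcases hv with hv | hv
      · exact hmapmem v hv
      · have hv' : v = remx names := by simpa using hv
        rw [hv', hrema]
        exact hremv (by rw [hivsA, List.length_map] at hlen; exact hlen)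
    · rw [if_neg hlen] at hv
      exact hmapmem v hv
  have hallB : ∀ v ∈ postB names, v = pvGap names x0 := by
    intro v hv
    unfold postB at hv
    by_cases hlen : 1 < (stBx names).2.2.1.length
    · rw [if_pos hlen, List.mem_append] at hv
      rcases hv with hv | hv
      · obtain ⟨x, hxl, rfl⟩ := b4' v hv
        exact hgap x (mem_of_rep names x hxl) hxl
      · have hv' : v = (names.length : Int) - (stBx names).2.2.2 := by simpa using hv
        rw [hv', b5']
        exact hremv (by rw [← b3']; exact hlen)
    · rw [if_neg hlen] at hv
      obtain ⟨x, hxl, rfl⟩ := b4' v hv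
      exact hgap x (mem_of_rep names x hxl) hxl
  -- both final lists are nonempty
  have hAne : postA names ≠ [] := by
    unfold postA
    have : ivsAx names ≠ [] := by
      rw [hivsA]
      simp only [ne_eq, List.map_eq_nil_iff]
      exact List.ne_nil_of_mem hx0r
    by_cases hlen : 1 < (ivsAx names).length
    · rw [if_pos hlen]; simp
    · rw [if_neg hlen]; exact this
  have hBne : postB names ≠ [] := by
    unfold postB
    have : (stBx names).2.2.1 ≠ [] := by
      intro hnil
      rw [hnil] at b3'
      have := List.length_pos_of_mem hx0r
      simp at b3'
      omega
    by_cases hlen : 1 < (stBx names).2.2.1.length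
    · rw [if_pos hlen]; simp
    · rw [if_neg hlen]; exact this
  rw [A_eval, B_eval, finalA _ _ hAne hallA, finalB _ _ hBne hallB]
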